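-- pv_equiv track=rewrite | github.com/hollowaytape/appareden | utils.py | properly_space_waits
-- ===== SOURCE A (Python) =====
-- def properly_space_waits(s):
--     """
--         Every [WAIT*] control code interferes with the spacing a bit.
--         (More accurately, Shadoff compression interferes with their spacing)
--         Need to add (n-1) spaces after or before every WAIT,
--         where n = the number of lowercase words that preceded it on the same line.
--     """
--     result = ''
--     wait_segments = s.split('[WAIT')
--     if len(wait_segments) <= 1:
--         return s
--     else:
--         for i, w in enumerate(wait_segments):
--             if i == len(wait_segments)-1:
--                 result += w
--                 break
--             ln_segments = w.split('[LN]')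
--             for j, l in enumerate(ln_segments):
--                 if j == len(ln_segments)-1:
--                     words = l.split()
--                     lowercase_count = len([word for word in words if word[0].islower()]) + 1
--                     result += l + ' '*(lowercase_count) + '[WAIT'
--                 else:
--                     result += l + '[LN]'
--     return result
-- ===== SOURCE B (Python) =====
-- def properly_space_waits(s):
--     # Single left-to-right scan: keep a running count of lowercase-initial words
--     # since the last [LN] / [WAIT] boundary; on each '[WAIT' emit count+1 spaces
--     # before it and reset.  No splitting or segment reconstruction.
--     out = []
--     count = 0
--     in_word = False
--     i = 0
--     n = len(s)
--     while i < n: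
--         if s.startswith('[WAIT', i):
--             out.append(' ' * (count + 1))
--             out.append('[WAIT')
--             i += 5
--             count = 0
--             in_word = False
--         elif s.startswith('[LN]', i):
--             out.append('[LN]')
--             i += 4
--             count = 0
--             in_word = False
--         else:
--             c = s[i]
--             if c.isspace():
--                 in_word = False
--             else:
--                 if not in_word and c.islower():
--                     count += 1
--                 in_word = True
--             out.append(c)
--             i += 1
--     return ''.join(out)
-- ===== Notes on version B (the rewrite author's own statement) =====
-- stated objective: alternative
-- what changed: Replaces A's two-level split on the WAIT marker and then on the LN marker (with enumerate loops and segment reconstruction) by a single left-to-right character scan (state machine) that keeps a running lowercase-initial-word count, resets it at each marker, and emits count+1 spaces in place at each WAIT marker; no splitting or joining at all.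
import Mathlib
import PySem

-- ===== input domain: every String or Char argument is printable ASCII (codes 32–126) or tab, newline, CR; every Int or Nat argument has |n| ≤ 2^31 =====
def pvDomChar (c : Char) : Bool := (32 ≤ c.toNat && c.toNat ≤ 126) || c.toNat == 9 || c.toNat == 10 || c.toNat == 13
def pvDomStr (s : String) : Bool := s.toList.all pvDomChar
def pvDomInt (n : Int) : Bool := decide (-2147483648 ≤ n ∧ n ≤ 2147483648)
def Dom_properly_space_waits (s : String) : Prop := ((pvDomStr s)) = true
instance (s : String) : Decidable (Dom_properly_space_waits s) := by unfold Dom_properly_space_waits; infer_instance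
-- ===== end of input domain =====

-- B replaces A's two-level split on the WAIT/LN markers + segment reconstruction by one
-- left-to-right character scan carrying a lowercase-word counter (objective: alternative).

-- ===== PORT A =====
-- word[0].islower(); the words produced by str.split() are never empty, so the [] case is unreachable
def pvHeadLower (word : List Char) : Bool :=
  match word with
  | c :: _ => PySem.Chars.islower c
  | [] => false

def properly_space_waits (s : String) : String :=
  let waitSegments := PySem.Chars.splitOn s.toList "[WAIT".toList
  if waitSegments.length ≤ 1 then s
  else
    String.ofList ((PySem.List.enumerate waitSegments).foldl (fun result iw =>
      if iw.1 = (waitSegments.length : Int) - 1 then result ++ iw.2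
      else
        let lnSegments := PySem.Chars.splitOn iw.2 "[LN]".toList
        (PySem.List.enumerate lnSegments).foldl (fun result jl =>
          if jl.1 = (lnSegments.length : Int) - 1 then
            let words := PySem.Chars.split₀ jl.2
            let lowercaseCount := (words.filter (fun word => pvHeadLower word)).length + 1
            result ++ jl.2 ++ List.replicate lowercaseCount ' ' ++ "[WAIT".toList
          else result ++ jl.2 ++ "[LN]".toList) result) [])

-- ===== PORT B =====
-- single pass over the character list; state = (count of lowercase-initial words since
-- the last boundary, currently-inside-a-word flag); mirrors Source B's while loop
def pvScan : List Char → Nat → Bool → List Char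
  | [], _, _ => []
  | ch :: rest, count, inWord =>
    if "[WAIT".toList.isPrefixOf (ch :: rest) then
      List.replicate (count + 1) ' ' ++ "[WAIT".toList ++ pvScan (List.drop 4 rest) 0 false
    else if "[LN]".toList.isPrefixOf (ch :: rest) then
      "[LN]".toList ++ pvScan (List.drop 3 rest) 0 false
    else if PySem.Chars.isspace ch then
      ch :: pvScan rest count false
    else
      ch :: pvScan rest (if !inWord && PySem.Chars.islower ch then count + 1 else count) true
termination_by l => l.length
decreasing_by all_goals first | (simp [List.length_drop]; omega) | simp

def properly_space_waits_alt (s : String) : String :=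
  String.ofList (pvScan s.toList 0 false)

-- ===== PRECONDITION & SPEC =====
def Spec_properly_space_waits (s : String) (out : String) : Prop := out = properly_space_waits_alt s
instance (s : String) (out : String) : Decidable (Spec_properly_space_waits s out) := by unfold Spec_properly_space_waits; infer_instance

-- ===== CLAIM (what is proved, stated in full; the proofs are below) =====
def Claim_equal_properly_space_waits : Prop := ∀ (s : String), Dom_properly_space_waits s → Spec_properly_space_waits s (properly_space_waits s)

-- ===== LEMMAS AND PROOFS =====

-- A simple structural model of PySem.Chars.splitOn (for nonempty sep)
def pvSplit (sep : List Char) : List Char → List (List Char)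
  | [] => [[]]
  | c :: rest =>
    if sep.isPrefixOf (c :: rest) = true ∧ sep ≠ [] then
      [] :: pvSplit sep (List.drop sep.length (c :: rest))
    else
      (pvSplit sep rest).modifyHead (c :: ·)
termination_by l => l.length
decreasing_by
  · rename_i h
    have : 1 ≤ sep.length := List.length_pos_iff.mpr h.2
    simp [List.length_drop]; omega
  · simp

theorem pvSplit_ne_nil (sep l) : pvSplit sep l ≠ [] := by
  fun_induction pvSplit sep l with
  | case1 => simp
  | case2 => simp
  | case3 _ _ _ ih => intro h; exact ih (by cases hh : pvSplit sep _ <;> simp_all [List.modifyHead])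

theorem pvSplitOn_go_eq (sep : List Char) (hsep : sep ≠ []) :
    ∀ (fuel : Nat) (l cur : List Char) (acc : List (List Char)), l.length < fuel →
    PySem.Chars.splitOn.go sep fuel l cur acc
      = acc.reverse ++ (pvSplit sep l).modifyHead (cur.reverse ++ ·) := by
  intro fuel
  induction fuel with
  | zero => intro l cur acc h; omega
  | succ n ih =>
    intro l cur acc h
    cases l with
    | nil =>
      simp [PySem.Chars.splitOn.go, pvSplit]
    | cons c rest =>
      rw [PySem.Chars.splitOn.go]
      by_cases hp : sep.isPrefixOf (c :: rest) = true
      · have hlen : 1 ≤ sep.length := List.length_pos_iff.mpr hsep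
        rw [if_pos hp]
        rw [ih _ _ _ (by simp [List.length_drop] at *; omega)]
        rw [pvSplit, if_pos ⟨hp, hsep⟩]
        cases pvSplit sep (List.drop sep.length (c :: rest)) <;> simp [List.modifyHead]
      · rw [if_neg hp]
        rw [ih _ _ _ (by simp at h ⊢; omega)]
        rw [pvSplit, if_neg (by tauto)]
        rcases hh : pvSplit sep rest with _ | ⟨a, t⟩
        · exact absurd hh (pvSplit_ne_nil sep rest)
        · simp [List.modifyHead]

theorem pvSplitOn_eq (l sep : List Char) (hsep : sep ≠ []) :
    PySem.Chars.splitOn l sep = pvSplit sep l := by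
  rw [PySem.Chars.splitOn, pvSplitOn_go_eq sep hsep (l.length + 1) l [] [] (by omega)]
  rcases hh : pvSplit sep l with _ | ⟨a, t⟩
  · exact absurd hh (pvSplit_ne_nil sep l)
  · simp [List.modifyHead]

theorem pvJoin_modifyHead_cons (sep : List Char) (c : Char) (ss : List (List Char)) (h : ss ≠ []) :
    PySem.Chars.join sep (ss.modifyHead (c :: ·)) = c :: PySem.Chars.join sep ss := by
  rcases ss with _ | ⟨a, t⟩
  · simp at h
  · rcases t with _ | ⟨b, t'⟩
    · simp [List.modifyHead, PySem.Chars.join_singleton]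
    · simp only [List.modifyHead, PySem.Chars.join_cons_cons]
      simp

theorem pvJoin_pvSplit (sep : List Char) (_hsep : sep ≠ []) (l : List Char) :
    PySem.Chars.join sep (pvSplit sep l) = l := by
  fun_induction pvSplit sep l with
  | case1 => simp [PySem.Chars.join_singleton]
  | case2 c rest hcond ih =>
    rcases hh : pvSplit sep (List.drop sep.length (c :: rest)) with _ | ⟨a, t⟩
    · exact absurd hh (pvSplit_ne_nil _ _)
    · rw [hh] at ih
      rw [PySem.Chars.join_cons_cons, ih]
      have hpre : sep <+: (c :: rest) := List.isPrefixOf_iff_prefix.mp hcond.1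
      have h2 := List.prefix_iff_eq_append.mp hpre
      simpa using h2
  | case3 c rest hcond ih =>
    rw [pvJoin_modifyHead_cons sep c _ (pvSplit_ne_nil sep rest), ih]

theorem pvJoin_append_singleton (sep : List Char) :
    ∀ (xs : List (List Char)) (y : List Char),
    PySem.Chars.join sep (xs ++ [y]) = xs.flatMap (· ++ sep) ++ y := by
  intro xs
  induction xs with
  | nil => intro y; simp [PySem.Chars.join_singleton]
  | cons x xs ih =>
    intro y
    rcases hh : xs ++ [y] with _ | ⟨z, zs⟩
    · simp at hh
    · rw [List.cons_append, hh, PySem.Chars.join_cons_cons, ← hh, ih]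
      simp

-- a foldl over enumerate whose condition fires exactly at the final index
theorem pvEnumLastFold {α β : Type} (f g : β → α → β) :
    ∀ (xs : List α) (k : Int) (y : α) (acc : β),
    (PySem.List.enumerate (xs ++ [y]) k).foldl
      (fun r p => if p.1 = k + (xs.length : Int) then g r p.2 else f r p.2) acc
    = g (xs.foldl f acc) y := by
  intro xs
  induction xs with
  | nil =>
    intro k y acc
    simp [PySem.List.enumerate, PySem.List.enumerate_cons]
  | cons x xs ih =>
    intro k y acc
    rw [List.cons_append, PySem.List.enumerate_cons, List.foldl_cons]
    rw [if_neg (by simp; omega)]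
    have hfn : (fun (r : β) (p : Int × α) => if p.1 = k + ((x :: xs).length : Int) then g r p.2 else f r p.2)
        = (fun r p => if p.1 = (k + 1) + (xs.length : Int) then g r p.2 else f r p.2) := by
      funext r p
      have : k + ((x :: xs).length : Int) = (k + 1) + (xs.length : Int) := by simp; omega
      rw [this]
    rw [hfn, ih]
    simp

-- A's per-[WAIT]-segment fix-up (the inner [LN] loop), in closed form
def pvFix (w : List Char) : List Char :=
  let parts := PySem.Chars.splitOn w "[LN]".toList
  let tail := PySem.List.pyGetD parts (-1) []
  let n := ((PySem.Chars.split₀ tail).countP (fun word => pvHeadLower word)) + 1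
  PySem.Chars.join "[LN]".toList (PySem.List.slice parts none (some (-1)) ++ [tail ++ List.replicate n ' '])

-- the inner enumerate loop of A, as a function of the accumulator and the segment
theorem pvInnerEq (r w : List Char) :
    ((PySem.List.enumerate (PySem.Chars.splitOn w "[LN]".toList)).foldl (fun result jl =>
      if jl.1 = ((PySem.Chars.splitOn w "[LN]".toList).length : Int) - 1 then
        result ++ jl.2 ++ List.replicate (((PySem.Chars.split₀ jl.2).filter (fun word => pvHeadLower word)).length + 1) ' ' ++ "[WAIT".toList
      else result ++ jl.2 ++ "[LN]".toList) r)
    = r ++ pvFix w ++ "[WAIT".toList := by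
  have hLN : ("[LN]".toList : List Char) ≠ [] := by decide
  simp only [pvFix, pvSplitOn_eq _ _ hLN]
  set parts := pvSplit "[LN]".toList w with hparts
  have hne : parts ≠ [] := pvSplit_ne_nil _ _
  rw [PySem.List.slice_to_neg_one, PySem.List.pyGetD_neg_one _ _ hne]
  set pxs := parts.dropLast with hpxs
  set py := parts.getLast hne with hpy
  have hdecomp : pxs ++ [py] = parts := List.dropLast_concat_getLast hne
  have hl : parts.length = pxs.length + 1 := by
    conv_lhs => rw [← hdecomp]
    simp
  have hfn : (fun (result : List Char) (jl : Int × List Char) =>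
        if jl.1 = (parts.length : Int) - 1 then
          result ++ jl.2 ++ List.replicate (((PySem.Chars.split₀ jl.2).filter (fun word => pvHeadLower word)).length + 1) ' ' ++ "[WAIT".toList
        else result ++ jl.2 ++ "[LN]".toList)
      = (fun (result : List Char) (jl : Int × List Char) =>
        if jl.1 = 0 + (pxs.length : Int) then
          result ++ (jl.2 ++ List.replicate (((PySem.Chars.split₀ jl.2).filter (fun word => pvHeadLower word)).length + 1) ' ' ++ "[WAIT".toList)
        else result ++ (jl.2 ++ "[LN]".toList)) := by
    funext result jl
    have : (parts.length : Int) - 1 = 0 + (pxs.length : Int) := by rw [hl]; push_cast; ring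
    rw [this]
    simp [List.append_assoc]
  rw [hfn]
  conv_lhs => rw [← hdecomp]
  rw [pvEnumLastFold (fun r l => r ++ (l ++ "[LN]".toList))
        (fun r l => r ++ (l ++ List.replicate (((PySem.Chars.split₀ l).filter (fun word => pvHeadLower word)).length + 1) ' ' ++ "[WAIT".toList))
        pxs 0 py r]
  rw [PySem.List.foldl_append_eq_flatMap (· ++ "[LN]".toList) pxs r]
  rw [pvJoin_append_singleton]
  simp [List.countP_eq_length_filter, List.append_assoc]

-- A rewritten as join over the [WAIT split, each non-final segment fixed by pvFix
def pvJoinForm (cs : List Char) : List Char :=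
  let segs := PySem.Chars.splitOn cs "[WAIT".toList
  PySem.Chars.join "[WAIT".toList
    ((PySem.List.slice segs none (some (-1))).map pvFix ++ [PySem.List.pyGetD segs (-1) []])

theorem pvGetLastD (l : List (List Char)) (h : l ≠ []) : l.getLast h = l.getLastD [] := by
  rw [List.getLastD_eq_getLast?, List.getLast?_eq_getLast h]
  rfl

theorem pvJoinForm_eq (cs : List Char) :
    pvJoinForm cs
      = (pvSplit "[WAIT".toList cs).dropLast.flatMap (fun w => pvFix w ++ "[WAIT".toList)
          ++ (pvSplit "[WAIT".toList cs).getLastD [] := by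
  have hW : ("[WAIT".toList : List Char) ≠ [] := by decide
  simp only [pvJoinForm, pvSplitOn_eq _ _ hW]
  rw [PySem.List.slice_to_neg_one, PySem.List.pyGetD_neg_one _ _ (pvSplit_ne_nil _ _),
    pvJoin_append_singleton, pvGetLastD _ (pvSplit_ne_nil _ _), List.flatMap_map]

-- A = the join form (A's nested folds collapsed)
theorem pvAEq (s : String) :
    properly_space_waits s = String.ofList (pvJoinForm s.toList) := by
  have hW : ("[WAIT".toList : List Char) ≠ [] := by decide
  simp only [properly_space_waits, pvJoinForm, pvSplitOn_eq _ _ hW]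
  set segs := pvSplit "[WAIT".toList s.toList with hsegs
  have hne : segs ≠ [] := pvSplit_ne_nil _ _
  have hjoin : PySem.Chars.join "[WAIT".toList segs = s.toList := pvJoin_pvSplit _ hW _
  rw [PySem.List.slice_to_neg_one, PySem.List.pyGetD_neg_one _ _ hne]
  have hdecomp : segs.dropLast ++ [segs.getLast hne] = segs := List.dropLast_concat_getLast hne
  set xs := segs.dropLast with hxs
  set y := segs.getLast hne with hy
  have hl : segs.length = xs.length + 1 := by
    conv_lhs => rw [← hdecomp]
    simp
  by_cases hlen : segs.length ≤ 1
  · rw [if_pos hlen]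
    have hx0 : xs = [] := by
      have : xs.length = 0 := by omega
      exact List.length_eq_zero_iff.mp this
    have : PySem.Chars.join "[WAIT".toList segs = y := by
      rw [← hdecomp, hx0]
      simp [PySem.Chars.join_singleton]
    rw [hx0]
    simp only [List.map_nil, List.nil_append, PySem.Chars.join_singleton]
    rw [← this, hjoin, String.ofList_toList]
  · rw [if_neg hlen]
    congr 1
    have hfn : (fun (result : List Char) (iw : Int × List Char) =>
          if iw.1 = (segs.length : Int) - 1 then result ++ iw.2
          else
            (PySem.List.enumerate (PySem.Chars.splitOn iw.2 "[LN]".toList)).foldl (fun result jl =>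
              if jl.1 = ((PySem.Chars.splitOn iw.2 "[LN]".toList).length : Int) - 1 then
                result ++ jl.2 ++ List.replicate (((PySem.Chars.split₀ jl.2).filter (fun word => pvHeadLower word)).length + 1) ' ' ++ "[WAIT".toList
              else result ++ jl.2 ++ "[LN]".toList) result)
        = (fun (result : List Char) (iw : Int × List Char) =>
          if iw.1 = 0 + (xs.length : Int) then result ++ iw.2
          else result ++ (pvFix iw.2 ++ "[WAIT".toList)) := by
      funext result iw
      have hli : (segs.length : Int) - 1 = 0 + (xs.length : Int) := by rw [hl]; push_cast; ring
      rw [hli]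
      by_cases hc : iw.1 = 0 + (xs.length : Int)
      · simp [hc]
      · rw [if_neg hc, if_neg hc, pvInnerEq]
        simp [List.append_assoc]
    rw [hfn]
    conv_lhs => rw [← hdecomp]
    rw [pvEnumLastFold (fun r w => r ++ (pvFix w ++ "[WAIT".toList)) (fun r w => r ++ w) xs 0 y []]
    rw [PySem.List.foldl_append_eq_flatMap (fun w => pvFix w ++ "[WAIT".toList) xs []]
    rw [pvJoin_append_singleton]
    simp [List.flatMap_map]

-- ===== scanner-side machinery =====

-- the scanner's word counter, on delimiter-free text (b = currently inside a word)
def pvCW : List Char → Bool → Nat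
  | [], _ => 0
  | ch :: rest, b =>
    if PySem.Chars.isspace ch then pvCW rest false
    else (if !b && PySem.Chars.islower ch then 1 else 0) + pvCW rest true

theorem pvCW_go (s : List Char) : ∀ (cur : List Char) (acc : List (List Char)),
    (PySem.Chars.split₀.go s cur acc).countP pvHeadLower
      = acc.countP pvHeadLower
        + (if cur.isEmpty then 0 else if pvHeadLower cur.reverse then 1 else 0)
        + pvCW s (!cur.isEmpty) := by
  induction s with
  | nil =>
    intro cur acc
    cases cur <;> simp [PySem.Chars.split₀.go, pvCW, List.countP_cons]
  | cons ch rest ih =>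
    intro cur acc
    rw [PySem.Chars.split₀.go]
    by_cases hs : PySem.Chars.isspace ch = true
    · rw [if_pos hs]
      cases cur with
      | nil => simp [ih, pvCW, hs]
      | cons d t =>
        rw [if_neg (by simp)]
        rw [ih]
        simp only [pvCW, hs, if_pos, List.isEmpty_nil, List.isEmpty_cons, List.countP_cons,
          Bool.not_false, Bool.not_true, if_true]
        simp only [Bool.false_eq_true, if_false]
        split_ifs <;> simp_all <;> omega
    · rw [if_neg hs]
      rw [ih]
      cases cur with
      | nil =>
        simp [pvCW, hs, pvHeadLower]
        omega
      | cons d t =>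
        have hrev : (ch :: d :: t).reverse = (d :: t).reverse ++ [ch] := by simp
        rw [hrev]
        rcases hh : (d :: t).reverse with _ | ⟨a, t'⟩
        · simp at hh
        · simp [pvCW, hs, pvHeadLower]

theorem pvCW_eq (x : List Char) :
    (PySem.Chars.split₀ x).countP pvHeadLower = pvCW x false := by
  rw [PySem.Chars.split₀, pvCW_go]
  simp

-- re-spacing of one [WAIT]-free segment, scanner style
def pvFixR : List Char → Nat → Bool → List Char
  | [], count, _ => List.replicate (count + 1) ' '
  | ch :: rest, count, b =>
    if "[LN]".toList.isPrefixOf (ch :: rest) then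
      "[LN]".toList ++ pvFixR (List.drop 3 rest) 0 false
    else if PySem.Chars.isspace ch then
      ch :: pvFixR rest count false
    else
      ch :: pvFixR rest (if !b && PySem.Chars.islower ch then count + 1 else count) true
termination_by l => l.length
decreasing_by all_goals first | (simp [List.length_drop]; omega) | simp

-- pvFix in getLast/dropLast form
theorem pvFix_norm (x : List Char) :
    pvFix x = PySem.Chars.join "[LN]".toList
        ((pvSplit "[LN]".toList x).dropLast
          ++ [(pvSplit "[LN]".toList x).getLastD []
              ++ List.replicate ((PySem.Chars.split₀ ((pvSplit "[LN]".toList x).getLastD [])).countP pvHeadLower + 1) ' ']) := by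
  have hLN : ("[LN]".toList : List Char) ≠ [] := by decide
  simp only [pvFix, pvSplitOn_eq _ _ hLN]
  rw [PySem.List.slice_to_neg_one, PySem.List.pyGetD_neg_one _ _ (pvSplit_ne_nil _ _),
    pvGetLastD _ (pvSplit_ne_nil _ _)]

-- join with a leading empty piece
theorem pvJoin_nil_cons (sep : List Char) (zs : List (List Char)) (h : zs ≠ []) :
    PySem.Chars.join sep ([] :: zs) = sep ++ PySem.Chars.join sep zs := by
  rcases zs with _ | ⟨a, t⟩
  · simp at h
  · rw [PySem.Chars.join_cons_cons]; simp

-- a singleton pvSplit means: no separator, the one piece is the input itself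
theorem pvSplit_singleton (sep x y : List Char) (hsep : sep ≠ [])
    (h : pvSplit sep x = [y]) : y = x := by
  have := pvJoin_pvSplit sep hsep x
  rw [h, PySem.Chars.join_singleton] at this
  exact this

theorem pvFix_single (x : List Char) (h : pvSplit "[LN]".toList x = [x]) :
    pvFix x = x ++ List.replicate (pvCW x false + 1) ' ' := by
  rw [pvFix_norm, h]
  simp [PySem.Chars.join_singleton, pvCW_eq]

theorem pvFix_LN_append (r : List Char) :
    pvFix ("[LN]".toList ++ r) = "[LN]".toList ++ pvFix r := by
  have hcond : ("[LN]".toList).isPrefixOf ("[LN]".toList ++ r) = true :=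
    List.isPrefixOf_iff_prefix.mpr (List.prefix_append _ _)
  have hsplit : pvSplit "[LN]".toList ("[LN]".toList ++ r)
      = [] :: pvSplit "[LN]".toList r := by
    rw [show ("[LN]".toList ++ r) = '[' :: ('L' :: 'N' :: ']' :: r) by simp]
    rw [pvSplit, if_pos ⟨by simpa using hcond, by decide⟩]
    simp
  rcases hp : pvSplit "[LN]".toList r with _ | ⟨p0, pt⟩
  · exact absurd hp (pvSplit_ne_nil _ _)
  · rw [pvFix_norm, pvFix_norm, hsplit, hp]
    rw [List.dropLast_cons₂, List.getLastD_cons, List.cons_append,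
      pvJoin_nil_cons _ _ (by simp)]

theorem pvFix_cons (ch : Char) (rest : List Char)
    (hpre : ¬ ("[LN]".toList).isPrefixOf (ch :: rest) = true)
    (hlen : 2 ≤ (pvSplit "[LN]".toList rest).length) :
    pvFix (ch :: rest) = ch :: pvFix rest := by
  have hsplit : pvSplit "[LN]".toList (ch :: rest)
      = (pvSplit "[LN]".toList rest).modifyHead (ch :: ·) := by
    rw [pvSplit, if_neg (by tauto)]
  rcases hp : pvSplit "[LN]".toList rest with _ | ⟨p0, pt⟩
  · exact absurd hp (pvSplit_ne_nil _ _)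
  · rcases pt with _ | ⟨p1, pt'⟩
    · rw [hp] at hlen; simp at hlen
    · rw [pvFix_norm, pvFix_norm, hsplit, hp]
      simp only [List.modifyHead_cons, List.dropLast_cons₂, List.getLastD_cons]
      rw [List.cons_append, List.cons_append]
      rw [show ((ch :: p0) :: ((p1 :: pt').dropLast ++ [pt'.getLastD p1 ++ List.replicate ((PySem.Chars.split₀ (pt'.getLastD p1)).countP pvHeadLower + 1) ' ']) : List (List Char))
            = (p0 :: ((p1 :: pt').dropLast ++ [pt'.getLastD p1 ++ List.replicate ((PySem.Chars.split₀ (pt'.getLastD p1)).countP pvHeadLower + 1) ' '])).modifyHead (ch :: ·) by simp]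
      rw [pvJoin_modifyHead_cons _ _ _ (by simp)]

-- generalized correctness of pvFixR against pvFix
theorem pvFixR_eq (x : List Char) (c : Nat) (b : Bool) :
    pvFixR x c b
      = if (pvSplit "[LN]".toList x).length ≤ 1 then x ++ List.replicate (c + pvCW x b + 1) ' '
        else pvFix x := by
  fun_induction pvFixR x c b with
  | case1 c b =>
    simp [pvSplit, pvCW]
  | case2 ch rest c b hcond ih =>
    obtain ⟨r, hr⟩ := List.isPrefixOf_iff_prefix.mp hcond
    have h2 : ('[' :: 'L' :: 'N' :: ']' :: r : List Char) = ch :: rest := by simpa using hr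
    have hch : ch = '[' := (List.cons.inj h2).1.symm
    have hrest : rest = 'L' :: 'N' :: ']' :: r := (List.cons.inj h2).2.symm
    have hdrop : List.drop 3 rest = r := by rw [hrest]; rfl
    rw [hdrop] at ih
    have hsplit : pvSplit "[LN]".toList (ch :: rest)
        = [] :: pvSplit "[LN]".toList r := by
      rw [pvSplit, if_pos ⟨hcond, by decide⟩]
      have : List.drop ("[LN]".toList).length (ch :: rest) = r := by
        rw [hch, hrest]; rfl
      rw [this]
    have hlen2 : ¬ (pvSplit "[LN]".toList (ch :: rest)).length ≤ 1 := by
      rw [hsplit]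
      have := List.length_pos_iff.mpr (pvSplit_ne_nil "[LN]".toList r)
      simp only [List.length_cons]
      omega
    rw [if_neg hlen2, hdrop]
    have hcr : (ch :: rest) = "[LN]".toList ++ r := by rw [hch, hrest]; rfl
    rw [hcr, pvFix_LN_append]
    congr 1
    rw [ih]
    by_cases h1 : (pvSplit "[LN]".toList r).length ≤ 1
    · rw [if_pos h1]
      have hsing : pvSplit "[LN]".toList r = [r] := by
        rcases hp : pvSplit "[LN]".toList r with _ | ⟨p0, pt⟩
        · exact absurd hp (pvSplit_ne_nil _ _)
        · rcases pt with _ | ⟨p1, pt'⟩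
          · rw [pvSplit_singleton _ _ _ (by decide) hp]
          · rw [hp] at h1; simp at h1
      rw [pvFix_single r hsing]
      simp only [Nat.zero_add]
    · rw [if_neg h1]
  | case3 ch rest c b hcond hs ih =>
    have hsplit : pvSplit "[LN]".toList (ch :: rest)
        = (pvSplit "[LN]".toList rest).modifyHead (ch :: ·) := by
      rw [pvSplit, if_neg (by tauto)]
    have hlen : (pvSplit "[LN]".toList (ch :: rest)).length
        = (pvSplit "[LN]".toList rest).length := by rw [hsplit]; simp
    simp only [dite_eq_ite] at ih
    rw [ih]
    by_cases h1 : (pvSplit "[LN]".toList rest).length ≤ 1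
    · rw [if_pos h1, if_pos (show (pvSplit "[LN]".toList (ch :: rest)).length ≤ 1 by omega)]
      have hcw : pvCW (ch :: rest) b = pvCW rest false := by
        rw [pvCW, if_pos hs]
      rw [hcw]
      simp
    · rw [if_neg h1, if_neg (show ¬ (pvSplit "[LN]".toList (ch :: rest)).length ≤ 1 by omega)]
      exact (pvFix_cons ch rest hcond (by omega)).symm
  | case4 ch rest c b hcond hs ih =>
    have hsplit : pvSplit "[LN]".toList (ch :: rest)
        = (pvSplit "[LN]".toList rest).modifyHead (ch :: ·) := by
      rw [pvSplit, if_neg (by tauto)]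
    have hlen : (pvSplit "[LN]".toList (ch :: rest)).length
        = (pvSplit "[LN]".toList rest).length := by rw [hsplit]; simp
    simp only [dite_eq_ite] at ih
    rw [ih]
    by_cases h1 : (pvSplit "[LN]".toList rest).length ≤ 1
    · rw [if_pos h1, if_pos (show (pvSplit "[LN]".toList (ch :: rest)).length ≤ 1 by omega)]
      have hcw : pvCW (ch :: rest) b
          = (if !b && PySem.Chars.islower ch then 1 else 0) + pvCW rest true := by
        rw [pvCW, if_neg hs]
      have harith : c + pvCW (ch :: rest) b
          = (if !b && PySem.Chars.islower ch then c + 1 else c) + pvCW rest true := by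
        rw [hcw]; split_ifs <;> omega
      rw [harith]
      simp
    · rw [if_neg h1, if_neg (show ¬ (pvSplit "[LN]".toList (ch :: rest)).length ≤ 1 by omega)]
      exact (pvFix_cons ch rest hcond (by omega)).symm

theorem pvFixR_zero (x : List Char) : pvFixR x 0 false = pvFix x := by
  rw [pvFixR_eq]
  by_cases h1 : (pvSplit "[LN]".toList x).length ≤ 1
  · rw [if_pos h1]
    have hsing : pvSplit "[LN]".toList x = [x] := by
      rcases hp : pvSplit "[LN]".toList x with _ | ⟨p0, pt⟩
      · exact absurd hp (pvSplit_ne_nil _ _)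
      · rcases pt with _ | ⟨p1, pt'⟩
        · rw [pvSplit_singleton _ _ _ (by decide) hp]
        · rw [hp] at h1; simp at h1
    rw [pvFix_single x hsing]
    simp only [Nat.zero_add]
  · rw [if_neg h1]

-- head of a pvSplit is a prefix of the input
theorem pvSplit_head_prefix (sep l : List Char) :
    ∀ x ss, pvSplit sep l = x :: ss → x <+: l := by
  fun_induction pvSplit sep l with
  | case1 =>
    intro x ss h
    rw [← (List.cons.inj h).1]
  | case2 c rest hcond ih =>
    intro x ss h
    rw [← (List.cons.inj h).1]
    exact List.nil_prefix
  | case3 c rest hcond ih =>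
    intro x ss h
    rcases hh : pvSplit sep rest with _ | ⟨a, t⟩
    · exact absurd hh (pvSplit_ne_nil _ _)
    · rw [hh] at h
      simp only [List.modifyHead_cons] at h
      have hx : x = c :: a := ((List.cons.inj h).1).symm
      rw [hx]
      exact List.cons_prefix_cons.mpr ⟨rfl, ih a t hh⟩

-- the scanner's value as a function of the [WAIT split
def pvF : List (List Char) → Nat → Bool → List Char
  | [], _, _ => []
  | [y], _, _ => y
  | x :: y :: ss, c, b => pvFixR x c b ++ "[WAIT".toList ++ pvF (y :: ss) 0 false

theorem pvScan_eq_F (l : List Char) (c : Nat) (b : Bool) :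
    pvScan l c b = pvF (pvSplit "[WAIT".toList l) c b := by
  fun_induction pvScan l c b with
  | case1 c b =>
    simp [pvSplit, pvF]
  | case2 ch rest c b hW ih =>
    obtain ⟨r, hr⟩ := List.isPrefixOf_iff_prefix.mp hW
    have h2 : ('[' :: 'W' :: 'A' :: 'I' :: 'T' :: r : List Char) = ch :: rest := by simpa using hr
    have hch : ch = '[' ∧ rest = 'W' :: 'A' :: 'I' :: 'T' :: r :=
      ⟨(List.cons.inj h2).1.symm, (List.cons.inj h2).2.symm⟩
    have hdrop : List.drop 4 rest = r := by rw [hch.2]; rfl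
    have hsplit : pvSplit "[WAIT".toList (ch :: rest)
        = [] :: pvSplit "[WAIT".toList r := by
      rw [pvSplit, if_pos ⟨hW, by decide⟩]
      have : List.drop ("[WAIT".toList).length (ch :: rest) = r := by
        rw [hch.1, hch.2]; rfl
      rw [this]
    rw [hsplit, hdrop]
    rw [hdrop] at ih
    rcases hp : pvSplit "[WAIT".toList r with _ | ⟨y, t⟩
    · exact absurd hp (pvSplit_ne_nil _ _)
    · rw [hp] at ih
      rw [ih]
      simp [pvF, pvFixR]
  | case3 ch rest c b hW hLN ih =>
    obtain ⟨r, hr⟩ := List.isPrefixOf_iff_prefix.mp hLN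
    have h2 : ('[' :: 'L' :: 'N' :: ']' :: r : List Char) = ch :: rest := by simpa using hr
    have hch : ch = '[' ∧ rest = 'L' :: 'N' :: ']' :: r :=
      ⟨(List.cons.inj h2).1.symm, (List.cons.inj h2).2.symm⟩
    have hdrop : List.drop 3 rest = r := by rw [hch.2]; rfl
    have hsplit : pvSplit "[WAIT".toList (ch :: rest)
        = (pvSplit "[WAIT".toList r).modifyHead (fun w => "[LN]".toList ++ w) := by
      rw [hch.1, hch.2]
      rw [pvSplit, if_neg (by rw [← hch.1, ← hch.2]; tauto)]
      rw [pvSplit, if_neg (by simp [List.isPrefixOf])]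
      rw [pvSplit, if_neg (by simp [List.isPrefixOf])]
      rw [pvSplit, if_neg (by simp [List.isPrefixOf])]
      rcases hp : pvSplit "[WAIT".toList r with _ | ⟨y, t⟩
      · exact absurd hp (pvSplit_ne_nil _ _)
      · simp [List.modifyHead]
    rw [hsplit, hdrop]
    rw [hdrop] at ih
    rcases hp : pvSplit "[WAIT".toList r with _ | ⟨y, t⟩
    · exact absurd hp (pvSplit_ne_nil _ _)
    · rw [hp] at ih
      simp only [List.modifyHead_cons]
      rcases t with _ | ⟨z, t'⟩
      · simp only [pvF] at ih ⊢
        rw [ih]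
      · simp only [pvF] at ih ⊢
        rw [ih]
        have hfix : pvFixR ("[LN]".toList ++ y) c b = "[LN]".toList ++ pvFixR y 0 false := by
          rw [show ("[LN]".toList ++ y : List Char) = '[' :: ('L' :: 'N' :: ']' :: y) by simp]
          rw [pvFixR, if_pos (by
            exact List.isPrefixOf_iff_prefix.mpr (by simpa using List.prefix_append "[LN]".toList y))]
          rfl
        rw [hfix]
        simp
  | case4 ch rest c b hW hLN hs ih =>
    have hsplit : pvSplit "[WAIT".toList (ch :: rest)
        = (pvSplit "[WAIT".toList rest).modifyHead (ch :: ·) := by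
      rw [pvSplit, if_neg (by tauto)]
    rw [hsplit]
    rcases hp : pvSplit "[WAIT".toList rest with _ | ⟨y, t⟩
    · exact absurd hp (pvSplit_ne_nil _ _)
    · rw [hp] at ih
      simp only [List.modifyHead_cons]
      rcases t with _ | ⟨z, t'⟩
      · simp only [pvF] at ih ⊢
        rw [ih]
      · simp only [pvF] at ih ⊢
        rw [ih]
        have hpre : ¬ ("[LN]".toList).isPrefixOf (ch :: y) = true := by
          intro hc
          have h1 : (ch :: y) <+: (ch :: rest) :=
            List.cons_prefix_cons.mpr ⟨rfl, pvSplit_head_prefix _ _ y (z :: t') hp⟩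
          exact hLN (List.isPrefixOf_iff_prefix.mpr
            ((List.isPrefixOf_iff_prefix.mp hc).trans h1))
        have hfix : pvFixR (ch :: y) c b = ch :: pvFixR y c false := by
          rw [pvFixR, if_neg hpre, if_pos hs]
        rw [hfix]
        simp
  | case5 ch rest c b hW hLN hs ih =>
    simp only [dite_eq_ite] at ih
    have hsplit : pvSplit "[WAIT".toList (ch :: rest)
        = (pvSplit "[WAIT".toList rest).modifyHead (ch :: ·) := by
      rw [pvSplit, if_neg (by tauto)]
    rw [hsplit]
    rcases hp : pvSplit "[WAIT".toList rest with _ | ⟨y, t⟩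
    · exact absurd hp (pvSplit_ne_nil _ _)
    · rw [hp] at ih
      simp only [List.modifyHead_cons]
      rcases t with _ | ⟨z, t'⟩
      · simp only [pvF] at ih ⊢
        rw [ih]
      · simp only [pvF] at ih ⊢
        rw [ih]
        have hpre : ¬ ("[LN]".toList).isPrefixOf (ch :: y) = true := by
          intro hc
          have h1 : (ch :: y) <+: (ch :: rest) :=
            List.cons_prefix_cons.mpr ⟨rfl, pvSplit_head_prefix _ _ y (z :: t') hp⟩
          exact hLN (List.isPrefixOf_iff_prefix.mpr
            ((List.isPrefixOf_iff_prefix.mp hc).trans h1))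
        have hfix : pvFixR (ch :: y) c b
            = ch :: pvFixR y (if !b && PySem.Chars.islower ch then c + 1 else c) true := by
          rw [pvFixR, if_neg hpre, if_neg hs]
        rw [hfix]
        simp

theorem pvF_join (ss : List (List Char)) (h : ss ≠ []) :
    pvF ss 0 false
      = ss.dropLast.flatMap (fun w => pvFix w ++ "[WAIT".toList) ++ ss.getLastD [] := by
  induction ss with
  | nil => exact absurd rfl h
  | cons x t ih =>
    cases t with
    | nil => simp [pvF]
    | cons y t' =>
      simp only [pvF]
      rw [pvFixR_zero, ih (by simp)]
      rw [List.dropLast_cons₂, List.getLastD_cons]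
      simp [← List.getLastD_eq_getLast?, List.getLastD_cons]

-- ===== VERDICT (by name: the statement is the Claim_ definition above) =====
theorem properly_space_waits_spec : Claim_equal_properly_space_waits := by
  intro s _
  show _ = _
  rw [pvAEq s, pvJoinForm_eq, properly_space_waits_alt, pvScan_eq_F, pvF_join _ (pvSplit_ne_nil _ _)]
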